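-- pv_equiv track=rewrite | github.com/mappoh/CC-Plocation | reporter.py | get_formula
-- ===== SOURCE A (Python) =====
-- from typing import Any, Dict, List, Optional
--
-- def get_formula(structure: Dict[str, Any]) -> str:
--     """Return a compact chemical formula string from the structure.
--
--     Elements are ordered alphabetically with counts appended, e.g.
--     ``"Ni1O39P1W11"``.
--
--     Parameters
--     ----------
--     structure : dict
--         Must contain 'atom_labels' (list of element symbols).
--
--     Returns
--     -------
--     str
--         Chemical formula string.
--     """
--     counts: Dict[str, int] = {}
--     for sp in structure["atom_labels"]:
--         counts[sp] = counts.get(sp, 0) + 1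
--
--     # Order: metals first (by convention, heaviest first), then non-metals
--     # A simple approach: sort alphabetically
--     parts = []
--     for elem in sorted(counts.keys()):
--         parts.append(f"{elem}{counts[elem]}")
--     return "".join(parts)
-- ===== SOURCE B (Python) =====
-- def get_formula(structure):
--     """Sort the atom labels and emit run-length groups (no count dict)."""
--     labels = sorted(structure["atom_labels"])
--     runs = []
--     i = 0
--     while i < len(labels):
--         j = i + 1
--         while j < len(labels) and labels[j] == labels[i]:
--             j += 1
--         runs.append((labels[i], j - i))
--         i = j
--     return "".join(f"{sym}{cnt}" for sym, cnt in runs)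
-- ===== Notes on version B (the rewrite author's own statement) =====
-- stated objective: alternative
-- what changed: Replaces the count-dict plus sorted-keys pass with sort-then-run-length: sort atom_labels once and emit one part per run of equal symbols, so no hash map is built.
import Mathlib
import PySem

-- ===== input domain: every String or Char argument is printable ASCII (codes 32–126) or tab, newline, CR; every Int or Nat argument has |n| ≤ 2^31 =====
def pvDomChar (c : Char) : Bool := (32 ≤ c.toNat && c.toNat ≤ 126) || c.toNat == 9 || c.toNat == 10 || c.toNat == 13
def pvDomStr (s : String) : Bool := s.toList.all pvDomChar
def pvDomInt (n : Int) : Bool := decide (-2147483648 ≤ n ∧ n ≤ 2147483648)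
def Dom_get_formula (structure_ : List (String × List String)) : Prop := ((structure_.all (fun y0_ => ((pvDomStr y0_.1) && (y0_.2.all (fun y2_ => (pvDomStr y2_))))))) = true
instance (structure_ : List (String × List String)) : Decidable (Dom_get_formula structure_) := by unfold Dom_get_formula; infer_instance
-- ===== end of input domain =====

-- B changes the decomposition: sort once, then one run-length pass, instead of A's count dict + sorted keys.

-- ===== PORT A =====
-- counts[elem] inside the loop over sorted(counts.keys()) always hits an existing key, so getD _ 0 is exact.
def get_formula (structure_ : List (String × List String)) : String :=
  match structure_.lookup "atom_labels" with
  | none => ""  -- KeyError in Python; excluded by Pre_get_formula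
  | some labels =>
    let counts : PySem.Dict String Int :=
      labels.foldl (fun d sp => d.insert sp (d.getD sp 0 + 1)) PySem.Dict.empty
    let parts : List String :=
      (PySem.List.sorted counts.keys (fun x => x) false).foldl
        (fun acc elem => acc ++ [elem ++ PySem.Int.toStr (counts.getD elem 0)]) []
    PySem.Str.join "" parts

-- ===== PORT B =====
-- the two-pointer while loop of Source B: a run is the head plus the longest prefix equal to it
def pvRunsB : List String → List (String × Nat)
  | [] => []
  | x :: xs =>
      (x, (xs.takeWhile (fun y => y == x)).length + 1) :: pvRunsB (xs.dropWhile (fun y => y == x))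
termination_by l => l.length
decreasing_by
  simp only [List.length_cons]
  exact Nat.lt_succ_of_le (List.length_dropWhile_le _ _)

def get_formula_alt (structure_ : List (String × List String)) : String :=
  match structure_.lookup "atom_labels" with
  | none => ""  -- KeyError in Python; excluded by Pre_get_formula
  | some labels =>
    let runs := pvRunsB (PySem.List.sorted labels (fun x => x) false)
    PySem.Str.join "" (runs.map (fun p => p.1 ++ PySem.Int.toStr (p.2 : Int)))

-- ===== PRECONDITION & SPEC =====
-- Python raises KeyError when 'atom_labels' is missing; excluded here.
def Pre_get_formula (structure_ : List (String × List String)) : Prop :=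
  (structure_.lookup "atom_labels").isSome = true
instance (structure_ : List (String × List String)) : Decidable (Pre_get_formula structure_) := by
  unfold Pre_get_formula; infer_instance

def pvWitness_get_formula : (List (String × List String)) := [("atom_labels", ["O", "H", "H", "Ni"])]

def Spec_get_formula (structure_ : List (String × List String)) (out : String) : Prop := out = get_formula_alt structure_
instance (structure_ : List (String × List String)) (out : String) : Decidable (Spec_get_formula structure_ out) := by unfold Spec_get_formula; infer_instance

-- ===== CLAIM (what is proved, stated in full; the proofs are below) =====
def Claim_equal_get_formula : Prop := ∀ (structure_ : List (String × List String)), Dom_get_formula structure_ → Pre_get_formula structure_ → Spec_get_formula structure_ (get_formula structure_)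

-- ===== LEMMAS AND PROOFS =====

-- keys of the run-length pass are exactly the elements of the list
theorem pvRunsB_keys_mem (l : List String) (k : String) :
    k ∈ (pvRunsB l).map Prod.fst ↔ k ∈ l := by
  induction l using pvRunsB.induct with
  | case1 => simp [pvRunsB]
  | case2 x xs ih =>
      rw [pvRunsB]
      simp only [List.map_cons, List.mem_cons, ih]
      conv_rhs => rw [← List.takeWhile_append_dropWhile (p := fun y => y == x) (l := xs)]
      simp only [List.mem_append]
      constructor
      · rintro (rfl | h)
        · exact Or.inl rfl
        · exact Or.inr (Or.inr h)
      · rintro (rfl | h | h)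
        · exact Or.inl rfl
        · exact Or.inl (by simpa using List.mem_takeWhile_imp h)
        · exact Or.inr h

-- on a sorted list the head does not reappear after its run
theorem pv_not_mem_drop (x : String) (xs : List String)
    (h : (x :: xs).Pairwise (· ≤ ·)) : x ∉ xs.dropWhile (fun y => y == x) := by
  intro hx
  have hsub : (xs.dropWhile (fun y => y == x)).Sublist xs := List.dropWhile_sublist _
  have hxle : ∀ y ∈ xs, x ≤ y := by
    intro y hy; exact (List.pairwise_cons.1 h).1 y hy
  cases hd : xs.dropWhile (fun y => y == x) with
  | nil => simp [hd] at hx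
  | cons z d' =>
      have hne' : xs.dropWhile (fun y => y == x) ≠ [] := by simp [hd]
      have hzne : ((fun y => y == x) ((xs.dropWhile (fun y => y == x)).head hne')) = false :=
        List.head_dropWhile_not _ hne'
      have hzx : z ≠ x := by
        have hhd : (xs.dropWhile (fun y => y == x)).head hne' = z := by simp [hd]
        rw [hhd] at hzne; simpa using hzne
      have hzmem : z ∈ xs := hsub.mem (by simp [hd])
      have hxz : x ≤ z := hxle z hzmem
      have hpw : (z :: d').Pairwise (· ≤ ·) :=
        ((List.pairwise_cons.1 h).2).sublist (hd ▸ hsub)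
      rw [hd] at hx
      rcases List.mem_cons.1 hx with rfl | hx'
      · exact hzx rfl
      · have : z ≤ x := (List.pairwise_cons.1 hpw).1 x hx'
        exact hzx (le_antisymm this hxz)

-- every run's count is the element's count in the whole (sorted) list
theorem pvRunsB_count (l : List String) (h : l.Pairwise (· ≤ ·)) :
    ∀ p ∈ pvRunsB l, p.2 = l.count p.1 := by
  induction l using pvRunsB.induct with
  | case1 => simp [pvRunsB]
  | case2 x xs ih =>
      rw [pvRunsB]
      intro p hp
      rcases List.mem_cons.1 hp with rfl | hp'
      · simp only
        have h1 : (xs.takeWhile (fun y => y == x)).count x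
            = (xs.takeWhile (fun y => y == x)).length := by
          apply List.count_eq_length.2
          intro b hb
          have hbx : b = x := by simpa using List.mem_takeWhile_imp hb
          exact hbx.symm
        have h2 : (xs.dropWhile (fun y => y == x)).count x = 0 :=
          List.count_eq_zero.2 (pv_not_mem_drop x xs h)
        have h3 : (x :: xs).count x
            = (xs.takeWhile (fun y => y == x)).count x
              + (xs.dropWhile (fun y => y == x)).count x + 1 := by
          rw [List.count_cons_self]
          conv_lhs => rw [← List.takeWhile_append_dropWhile (p := fun y => y == x) (l := xs)]
          rw [List.count_append]
        omega
      · have hpw : (xs.dropWhile (fun y => y == x)).Pairwise (· ≤ ·) :=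
          ((List.pairwise_cons.1 h).2).sublist (List.dropWhile_sublist _)
        have hih := ih hpw p hp'
        have hx : p.1 ∈ (pvRunsB (xs.dropWhile (fun y => y == x))).map Prod.fst :=
          List.mem_map.2 ⟨p, hp', rfl⟩
        have hmem : p.1 ∈ xs.dropWhile (fun y => y == x) := (pvRunsB_keys_mem _ _).1 hx
        have hne : p.1 ≠ x := by
          intro hEq; exact pv_not_mem_drop x xs h (hEq ▸ hmem)
        have h1 : (xs.takeWhile (fun y => y == x)).count p.1 = 0 := by
          apply List.count_eq_zero.2
          intro hc
          exact hne (by simpa using List.mem_takeWhile_imp hc)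
        have h3 : (x :: xs).count p.1
            = (xs.takeWhile (fun y => y == x)).count p.1
              + (xs.dropWhile (fun y => y == x)).count p.1 := by
          rw [List.count_cons_of_ne hne.symm]
          conv_lhs => rw [← List.takeWhile_append_dropWhile (p := fun y => y == x) (l := xs)]
          rw [List.count_append]
        omega

-- on a sorted list, run keys are strictly increasing
theorem pvRunsB_keys_lt (l : List String) (h : l.Pairwise (· ≤ ·)) :
    ((pvRunsB l).map Prod.fst).Pairwise (· < ·) := by
  induction l using pvRunsB.induct with
  | case1 => simp [pvRunsB]
  | case2 x xs ih =>
      rw [pvRunsB]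
      simp only [List.map_cons]
      have hpw : (xs.dropWhile (fun y => y == x)).Pairwise (· ≤ ·) :=
        ((List.pairwise_cons.1 h).2).sublist (List.dropWhile_sublist _)
      refine List.pairwise_cons.2 ⟨?_, ih hpw⟩
      intro k hk
      have hmem : k ∈ xs.dropWhile (fun y => y == x) := (pvRunsB_keys_mem _ _).1 hk
      have hxk : x ≤ k :=
        (List.pairwise_cons.1 h).1 k ((List.dropWhile_sublist _).mem hmem)
      have hne : x ≠ k := by
        intro hEq; exact pv_not_mem_drop x xs h (hEq ▸ hmem)
      exact lt_of_le_of_ne hxk hne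

-- the run keys of the sorted list ARE sorted(set(labels))
theorem pv_keys_eq (labels : List String) :
    PySem.List.sorted (PySem.Set.ofList labels) (fun x => x) false
      = (pvRunsB (PySem.List.sorted labels (fun x => x) false)).map Prod.fst := by
  have hsorted : (PySem.List.sorted labels (fun x => x) false).Pairwise (· ≤ ·) := by
    simpa using PySem.List.sorted_pairwise labels (fun x => x)
  have hlt := pvRunsB_keys_lt _ hsorted
  apply PySem.List.sorted_eq_of_perm_of_pairwise_lt
  · refine (List.perm_ext_iff_of_nodup (hlt.imp ne_of_lt) (PySem.Set.nodup_ofList labels)).2 ?_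
    intro a
    rw [pvRunsB_keys_mem, PySem.List.mem_sorted, PySem.Set.mem_ofList]
  · simpa using hlt

theorem pv_parts_eq (labels : List String) :
    (PySem.List.sorted (PySem.Set.ofList labels) (fun x => x) false).map
        (fun k => k ++ PySem.Int.toStr (labels.count k : Int))
      = (pvRunsB (PySem.List.sorted labels (fun x => x) false)).map
          (fun p => p.1 ++ PySem.Int.toStr (p.2 : Int)) := by
  rw [pv_keys_eq, List.map_map]
  apply List.map_congr_left
  intro p hp
  have hsorted : (PySem.List.sorted labels (fun x => x) false).Pairwise (· ≤ ·) := by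
    simpa using PySem.List.sorted_pairwise labels (fun x => x)
  have hc := pvRunsB_count _ hsorted p hp
  have hperm : (PySem.List.sorted labels (fun x => x) false).Perm labels :=
    PySem.List.sorted_perm _ _ _
  simp only [Function.comp_apply, hc, hperm.count_eq]

-- ===== VERDICT (by name: the statement is the Claim_ definition above) =====
theorem get_formula_spec : Claim_equal_get_formula := by
  intro structure_ _hdom _hpre
  unfold Spec_get_formula
  cases hl : structure_.lookup "atom_labels" with
  | none => simp [get_formula, get_formula_alt, hl]
  | some labels =>
      simp only [get_formula, get_formula_alt, hl]
      rw [PySem.Dict.foldl_insert_getD_add_one_eq_counter labels,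
          PySem.List.foldl_append_singleton_eq_map]
      simp only [List.nil_append, PySem.Dict.getD_counter, PySem.Dict.keys_counter]
      congr 1
      exact pv_parts_eq labels
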